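-- pv_equiv track=rewrite | github.com/Aleksandr2407911/Tetrika_test | broken_task_2.py | zip_file
-- ===== SOURCE A (Python) =====
-- def zip_file(times: list[int]) -> list[tuple[int, int]]:
--     count = 0
--     time_in = []
--     time_out = []
--     for time in times:
--         if count % 2 == 0:
--             time_in.append(time)
--         else:
--             time_out.append(time)
--         count += 1
--     pair_time = list(zip(time_in, time_out))
--     return pair_time
-- ===== SOURCE B (Python) =====
-- def zip_file(times: list[int]) -> list[tuple[int, int]]:
--     pairs = []
--     it = iter(times)
--     for a in it:
--         b = next(it, None)
--         if b is None:
--             break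
--         pairs.append((a, b))
--     return pairs
-- ===== Notes on version B (the rewrite author's own statement) =====
-- stated objective: simpler
-- what changed: B consumes the list two elements at a time (one iterator drawn twice per step), emitting each pair directly, instead of A's counter-driven split into even/odd-index accumulator lists that are then zipped.
import Mathlib
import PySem

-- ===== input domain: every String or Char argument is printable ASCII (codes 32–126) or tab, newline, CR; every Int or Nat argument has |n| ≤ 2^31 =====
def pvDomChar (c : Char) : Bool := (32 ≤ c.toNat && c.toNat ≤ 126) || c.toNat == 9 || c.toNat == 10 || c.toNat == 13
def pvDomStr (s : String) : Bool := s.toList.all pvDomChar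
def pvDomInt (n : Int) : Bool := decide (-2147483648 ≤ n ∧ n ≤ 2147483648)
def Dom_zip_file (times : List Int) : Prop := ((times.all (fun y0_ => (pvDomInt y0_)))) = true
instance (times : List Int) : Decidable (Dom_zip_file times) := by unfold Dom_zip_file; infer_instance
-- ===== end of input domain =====

-- B pairs the list by consuming it two elements at a time instead of A's even/odd accumulator lists plus zip; objective: simpler.

-- ===== PORT A =====
-- A: one pass with a counter appending to time_in (even count) or time_out (odd count), then zip.
def zip_file (times : List Int) : List (Int × Int) :=
  let st := times.foldl
    (fun (st : Int × List Int × List Int) time =>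
      let (count, time_in, time_out) := st
      if PySem.Int.mod count 2 = 0 then (count + 1, time_in ++ [time], time_out)
      else (count + 1, time_in, time_out ++ [time]))
    (0, [], [])
  st.2.1.zip st.2.2

-- ===== PORT B =====
-- B: one pass drawing two elements per step from a single iterator; ported as the
-- corresponding two-at-a-time structural recursion (break when the second draw is exhausted).
def zip_file_alt (times : List Int) : List (Int × Int) :=
  match times with
  | a :: b :: rest => (a, b) :: zip_file_alt rest
  | _ => []

-- ===== PRECONDITION & SPEC =====
def Spec_zip_file (times : List Int) (out : List (Int × Int)) : Prop := out = zip_file_alt times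
instance (times : List Int) (out : List (Int × Int)) : Decidable (Spec_zip_file times out) := by unfold Spec_zip_file; infer_instance

-- ===== CLAIM (what is proved, stated in full; the proofs are below) =====
def Claim_equal_zip_file : Prop := ∀ (times : List Int), Dom_zip_file times → Spec_zip_file times (zip_file times)

-- ===== LEMMAS AND PROOFS =====

-- Loop invariant: starting from an even count with equally long accumulators, the zip of the
-- final accumulators is the zip of the current ones followed by B's pairing of the rest.
theorem zip_file_invariant (times : List Int) :
    ∀ (count : Int) (tin tout : List Int), PySem.Int.mod count 2 = 0 → tin.length = tout.length →
      (let st := times.foldl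
        (fun (st : Int × List Int × List Int) time =>
          let (count, time_in, time_out) := st
          if PySem.Int.mod count 2 = 0 then (count + 1, time_in ++ [time], time_out)
          else (count + 1, time_in, time_out ++ [time]))
        (count, tin, tout)
       st.2.1.zip st.2.2) = tin.zip tout ++ zip_file_alt times := by
  induction times using zip_file_alt.induct with
  | case1 a b rest ih =>
      intro count tin tout hc hlen
      have hc1 : ¬ PySem.Int.mod (count + 1) 2 = 0 := by
        rw [PySem.Int.mod_eq_emod_of_pos (by omega : (0:Int) < 2)] at hc ⊢
        omega
      simp only [List.foldl, hc, if_pos, hc1, if_neg, not_false_iff]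
      have hc2 : PySem.Int.mod (count + 1 + 1) 2 = 0 := by
        rw [PySem.Int.mod_eq_emod_of_pos (by omega : (0:Int) < 2)] at hc ⊢
        omega
      rw [ih (count + 1 + 1) (tin ++ [a]) (tout ++ [b]) hc2 (by simp [hlen])]
      rw [List.zip_append hlen]
      simp [zip_file_alt]
  | case2 times h =>
      intro count tin tout hc hlen
      rcases times with _ | ⟨a, _ | ⟨b, rest⟩⟩
      · simp [zip_file_alt]
      · simp only [List.foldl, hc, if_pos]
        have hz : (tin ++ [a]).zip tout = tin.zip tout := by
          have := List.zip_append (r₁ := [a]) (r₂ := ([] : List Int)) hlen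
          simpa using this
        simp [hz, zip_file_alt]
      · exact absurd rfl (h a b rest)

-- ===== VERDICT (by name: the statement is the Claim_ definition above) =====
theorem zip_file_spec : Claim_equal_zip_file := by
  intro times _
  show zip_file times = zip_file_alt times
  have := zip_file_invariant times 0 [] [] (by decide) rfl
  simpa [zip_file] using this
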